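-- pv_equiv track=rewrite | github.com/weixian-zhang/AlgosAmigos | src/Codility-Practices/NailingPlanks.py | solution
-- ===== SOURCE A (Python) =====
-- def solution(A, B, C):
--
--     result = -1
--
--     A.sort()
--     B.sort()
--     C = list(set(C))
--
--     for _, n in enumerate(C):
--
--         i = 0
--         while A and i <= len(A) - 1:
--             if n in range(A[i], B[i] + 1):
--                 A.pop(i)
--                 B.pop(i)
--                 i = 0
--                 if result == -1:
--                     result = 1
--                 else:
--                     result += 1
--             else:
--                 i += 1
--
--     return -1 if A else result
-- ===== SOURCE B (Python) =====
-- def solution(A, B, C):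
--     if not A:
--         return -1
--     nails = sorted(set(C))
--     j = 0
--     for a, b in zip(sorted(A), sorted(B)):
--         while j < len(nails) and nails[j] < a:
--             j += 1
--         if j == len(nails) or nails[j] > b:
--             return -1
--     return len(A)
-- ===== Notes on version B (the rewrite author's own statement) =====
-- stated objective: faster
-- what changed: Replaces the per-nail quadratic scan-with-restart over mutating plank lists by sort-the-distinct-nails once and a single two-pointer merge over the sorted plank pairs, checking each plank against the smallest nail not below its left end.
-- outside the precondition, e.g. on solution([1], [], []): A returns -1, B returns 1; on solution([1], [], [0]): A raises IndexError, B returns 1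
import Mathlib
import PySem

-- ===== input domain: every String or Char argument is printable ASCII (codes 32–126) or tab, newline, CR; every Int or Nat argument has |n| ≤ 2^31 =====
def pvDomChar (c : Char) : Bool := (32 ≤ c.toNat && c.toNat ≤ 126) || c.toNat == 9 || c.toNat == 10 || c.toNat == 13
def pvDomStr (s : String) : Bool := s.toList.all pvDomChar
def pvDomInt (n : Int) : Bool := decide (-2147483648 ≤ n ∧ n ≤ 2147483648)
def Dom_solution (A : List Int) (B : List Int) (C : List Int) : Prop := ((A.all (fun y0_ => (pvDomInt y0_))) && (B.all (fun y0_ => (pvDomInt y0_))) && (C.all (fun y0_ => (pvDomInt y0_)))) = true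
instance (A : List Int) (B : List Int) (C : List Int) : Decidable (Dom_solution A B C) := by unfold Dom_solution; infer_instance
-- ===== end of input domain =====

-- B replaces A's per-nail rescans of the mutating plank lists by one sorted-nails two-pointer sweep
-- (objective: faster, measured). Equivalence is about the RETURN value only:
-- the Python A sorts and pops its list arguments A and B in place; B does not mutate its arguments.

-- ===== PORT A =====
-- inner `while A and i <= len(A) - 1` loop; none = IndexError on B[i]
def innerA (n : Int) (As Bs : List Int) (res : Int) (i : Nat) : Option (List Int × List Int × Int) :=
  if h : i < As.length then
    match Bs[i]? with
    | none => none
    | some b =>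
      if As[i] ≤ n ∧ n ≤ b then
        innerA n (As.eraseIdx i) (Bs.eraseIdx i) (if res = -1 then 1 else res + 1) 0
      else
        innerA n As Bs res (i + 1)
  else some (As, Bs, res)
termination_by (As.length, As.length - i)
decreasing_by
  · apply Prod.Lex.left
    simp [List.length_eraseIdx, h]
    omega
  · apply Prod.Lex.right
    omega

-- outer `for _, n in enumerate(C)` loop over list(set(C))
def outerA : List Int → List Int → List Int → Int → Option (List Int × List Int × Int)
  | [], As, Bs, res => some (As, Bs, res)
  | n :: rest, As, Bs, res =>
    match innerA n As Bs res 0 with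
    | none => none
    | some (As', Bs', res') => outerA rest As' Bs' res'

def solution (A : List Int) (B : List Int) (C : List Int) : Int :=
  match outerA (PySem.Set.ofList C) (PySem.List.sorted A (fun x => x) false)
      (PySem.List.sorted B (fun x => x) false) (-1) with
  | none => 0   -- Python raises IndexError here; outside Pre_solution
  | some (As', _, res) => if As' = [] then res else -1

-- ===== PORT B =====
-- `while j < len(nails) and nails[j] < a: j += 1`: the nail list from position j on
def skipNails (a : Int) : List Int → List Int
  | [] => []
  | n :: rest => if n < a then skipNails a rest else n :: rest

-- `for a, b in zip(sorted(A), sorted(B))` with the early `return -1` (false);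
-- the two-pointer position j is carried as the remaining nail suffix
def altLoop : List (Int × Int) → List Int → Bool
  | [], _ => true
  | (a, b) :: rest, nails =>
    match skipNails a nails with
    | [] => false
    | n :: ns => if b < n then false else altLoop rest (n :: ns)

def solution_alt (A : List Int) (B : List Int) (C : List Int) : Int :=
  if A = [] then -1
  else
    if altLoop ((PySem.List.sorted A (fun x => x) false).zip (PySem.List.sorted B (fun x => x) false))
        (PySem.List.sorted (PySem.Set.ofList C) (fun x => x) false) then
      (A.length : Int)
    else -1

-- ===== PRECONDITION & SPEC =====
-- Pre_ restricts to the natural domain of paired plank lists, len(A) <= len(B): with more A-entries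
-- than B-entries the Python A raises IndexError on B[i] whenever C is nonempty, and when C is empty
-- its -1 on that malformed input is an accident of the mismatched lists.
def Pre_solution (A : List Int) (B : List Int) (C : List Int) : Prop := A.length ≤ B.length
instance (A : List Int) (B : List Int) (C : List Int) : Decidable (Pre_solution A B C) := by
  unfold Pre_solution; infer_instance
def pvWitness_solution : List Int × List Int × List Int := ([1, 5], [3, 9], [2, 6])

def Spec_solution (A : List Int) (B : List Int) (C : List Int) (out : Int) : Prop := out = solution_alt A B C
instance (A : List Int) (B : List Int) (C : List Int) (out : Int) : Decidable (Spec_solution A B C out) := by unfold Spec_solution; infer_instance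

-- ===== CLAIM (what is proved, stated in full; the proofs are below) =====
def Claim_equal_solution : Prop := ∀ (A : List Int) (B : List Int) (C : List Int), Dom_solution A B C → Pre_solution A B C → Spec_solution A B C (solution A B C)

-- ===== LEMMAS AND PROOFS =====

def covN (n : Int) (p : Int × Int) : Bool := decide (p.1 ≤ n ∧ n ≤ p.2)

def keepN (n : Int) (p : Int × Int) : Bool := !covN n p

def bump (r : Int) (k : Nat) : Int := if k = 0 then r else if r = -1 then (k : Int) else r + k

lemma bump_succ (r : Int) (hr : r = -1 ∨ 1 ≤ r) (k : Nat) :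
    bump (if r = -1 then 1 else r + 1) k = bump r (k + 1) := by
  rcases hr with rfl | hr <;> unfold bump <;> split_ifs <;>
    first | exact (by assumption : False).elim | omega

lemma zip_eraseIdx (l₁ l₂ : List Int) (i : Nat) :
    (l₁.eraseIdx i).zip (l₂.eraseIdx i) = (l₁.zip l₂).eraseIdx i := by
  induction l₁ generalizing l₂ i with
  | nil => simp
  | cons a t₁ ih =>
    cases l₂ with
    | nil => simp
    | cons b t₂ =>
      cases i with
      | zero => simp
      | succ j => simp [List.eraseIdx, ih]

lemma filter_eraseIdx_of_neg {α : Type} (f : α → Bool) :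
    ∀ (P : List α) (i : Nat) (h : i < P.length), f P[i] = false →
      P.filter f = (P.eraseIdx i).filter f := by
  intro P
  induction P with
  | nil => intro i h; simp at h
  | cons p t ih =>
    intro i h hf
    cases i with
    | zero => simp at hf; simp [List.filter_cons, hf]
    | succ j =>
      simp at h hf
      simp [List.eraseIdx, List.filter_cons, ih j h hf]

lemma inner_spec (n : Int) : ∀ (As Bs : List Int) (res : Int) (i : Nat),
    As.length ≤ Bs.length → (res = -1 ∨ 1 ≤ res) →
    (∀ j, j < i → ∀ (hj : j < (As.zip Bs).length), keepN n (As.zip Bs)[j] = true) →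
    ∃ As' Bs', innerA n As Bs res i =
        some (As', Bs', bump res ((As.zip Bs).length - ((As.zip Bs).filter (keepN n)).length))
      ∧ As'.zip Bs' = (As.zip Bs).filter (keepN n)
      ∧ As' = ((As.zip Bs).filter (keepN n)).map Prod.fst
      ∧ As'.length ≤ Bs'.length := by
  intro As Bs res i
  induction As, Bs, res, i using innerA.induct n with
  | case1 As Bs res i hi hb =>
    intro hlen _ _
    rw [List.getElem?_eq_none_iff] at hb
    omega
  | case2 As Bs res i h b hb hcond ih =>
    intro hlen hr hpre
    have hbl : i < Bs.length := (List.getElem?_eq_some_iff.mp hb).1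
    have hbv : Bs[i] = b := by
      have := (List.getElem?_eq_some_iff.mp hb).2; exact this.symm ▸ rfl
    have hPlen : (As.zip Bs).length = As.length := by
      simp [List.length_zip]; omega
    have hiP : i < (As.zip Bs).length := by omega
    have hPi : (As.zip Bs)[i] = (As[i], Bs[i]) := List.getElem_zip ..
    have hkeep : keepN n (As.zip Bs)[i] = false := by
      simp [hPi, keepN, covN, hbv, hcond.1, hcond.2]
    obtain ⟨As', Bs', heq, hzip, hmap, hlen'⟩ :=
      ih (by simp [List.length_eraseIdx, h, hbl]; omega)
         (by rcases hr with rfl | hr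
             · exact Or.inr (by simp)
             · refine Or.inr ?_; split_ifs <;> omega)
         (by intro j hj _; omega)
    simp only [dite_eq_ite] at heq
    refine ⟨As', Bs', ?_, ?_, ?_, hlen'⟩
    · have hK : ((As.zip Bs).filter (keepN n)).length ≤ ((As.zip Bs).eraseIdx i).length := by
        rw [filter_eraseIdx_of_neg (keepN n) (As.zip Bs) i hiP hkeep]
        exact List.length_filter_le ..
      have hE : ((As.zip Bs).eraseIdx i).length = (As.zip Bs).length - 1 :=
        List.length_eraseIdx_of_lt hiP
      rw [innerA]
      simp only [h, dite_true, dif_pos, hb]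
      rw [if_pos hcond]
      rw [heq, zip_eraseIdx, ← filter_eraseIdx_of_neg (keepN n) (As.zip Bs) i hiP hkeep]
      rw [bump_succ res hr]
      have harith : ((As.zip Bs).eraseIdx i).length -
          ((As.zip Bs).filter (keepN n)).length + 1 =
          (As.zip Bs).length - ((As.zip Bs).filter (keepN n)).length := by omega
      rw [harith]
    · rw [hzip, zip_eraseIdx, ← filter_eraseIdx_of_neg (keepN n) (As.zip Bs) i hiP hkeep]
    · rw [hmap, zip_eraseIdx, ← filter_eraseIdx_of_neg (keepN n) (As.zip Bs) i hiP hkeep]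
  | case3 As Bs res i h b hb hcond ih =>
    intro hlen hr hpre
    have hbl : i < Bs.length := (List.getElem?_eq_some_iff.mp hb).1
    have hbv : Bs[i] = b := by
      have := (List.getElem?_eq_some_iff.mp hb).2; exact this.symm ▸ rfl
    have hPi : (As.zip Bs)[i]'(by simp [List.length_zip]; omega) = (As[i], Bs[i]) := List.getElem_zip ..
    obtain ⟨As', Bs', heq, hzip, hmap, hlen'⟩ :=
      ih hlen hr (by
        intro j hj hjP
        rcases Nat.lt_or_ge j i with hji | hji
        · exact hpre j hji hjP
        · have : j = i := by omega
          subst this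
          simp [hPi, keepN, covN, hbv]
          rcases not_and_or.mp hcond with h1 | h1 <;> omega)
    refine ⟨As', Bs', ?_, hzip, hmap, hlen'⟩
    rw [innerA]
    simp only [h, dite_true, dif_pos, hb]
    rw [if_neg hcond]
    exact heq
  | case4 As Bs res i h =>
    intro hlen hr hpre
    have hfil : (As.zip Bs).filter (keepN n) = As.zip Bs := by
      apply List.filter_eq_self.mpr
      intro a ha
      obtain ⟨j, hj, rfl⟩ := List.mem_iff_getElem.mp ha
      exact hpre j (by simp [List.length_zip] at hj; omega) hj
    refine ⟨As, Bs, ?_, by rw [hfil], ?_, hlen⟩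
    · rw [innerA]
      simp only [h, dite_false, dif_neg]
      rw [hfil]
      simp [bump]
    · rw [hfil]
      exact (List.map_fst_zip hlen).symm

def survA (ns : List Int) (p : Int × Int) : Bool := ns.all (fun n => !covN n p)

lemma bump_ok (r : Int) (hr : r = -1 ∨ 1 ≤ r) (k : Nat) : bump r k = -1 ∨ 1 ≤ bump r k := by
  rcases hr with rfl | hr <;> unfold bump <;> split_ifs <;>
    first | exact (by assumption : False).elim | omega

lemma bump_bump (r : Int) (hr : r = -1 ∨ 1 ≤ r) (k₁ k₂ : Nat) :
    bump (bump r k₁) k₂ = bump r (k₁ + k₂) := by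
  rcases hr with rfl | hr <;> unfold bump <;> split_ifs <;>
    first | exact (by assumption : False).elim | omega

lemma outer_spec : ∀ (ns : List Int) (As Bs : List Int) (res : Int),
    As.length ≤ Bs.length → (res = -1 ∨ 1 ≤ res) →
    ∃ As' Bs', outerA ns As Bs res =
        some (As', Bs', bump res ((As.zip Bs).length - ((As.zip Bs).filter (survA ns)).length))
      ∧ As'.zip Bs' = (As.zip Bs).filter (survA ns)
      ∧ As' = ((As.zip Bs).filter (survA ns)).map Prod.fst
      ∧ As'.length ≤ Bs'.length := by
  intro ns
  induction ns with
  | nil =>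
    intro As Bs res hlen hr
    have hfil : (As.zip Bs).filter (survA []) = As.zip Bs := by
      apply List.filter_eq_self.mpr
      intro a _
      simp [survA]
    refine ⟨As, Bs, ?_, by rw [hfil], by rw [hfil]; exact (List.map_fst_zip hlen).symm, hlen⟩
    rw [outerA, hfil]
    simp [bump]
  | cons n rest ih =>
    intro As Bs res hlen hr
    obtain ⟨As1, Bs1, heq1, hzip1, hmap1, hlen1⟩ :=
      inner_spec n As Bs res 0 hlen hr (by intro j hj _; omega)
    obtain ⟨As', Bs', heq2, hzip2, hmap2, hlen2⟩ :=
      ih As1 Bs1 _ hlen1 (bump_ok res hr _)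
    have hfil2 : (As1.zip Bs1).filter (survA rest) = (As.zip Bs).filter (survA (n :: rest)) := by
      rw [hzip1, List.filter_filter]
      apply List.filter_congr
      intro a _
      simp [survA, keepN, Bool.and_comm]
    refine ⟨As', Bs', ?_, by rw [hzip2, hfil2], by rw [hmap2, hfil2], hlen2⟩
    rw [outerA]
    rw [heq1]
    simp only []
    rw [heq2]
    have hK : ((As.zip Bs).filter (keepN n)).length ≤ (As.zip Bs).length :=
      List.length_filter_le ..
    have hR : ((As.zip Bs).filter (survA (n :: rest))).length ≤ ((As.zip Bs).filter (keepN n)).length := by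
      rw [← hfil2, hzip1]
      exact List.length_filter_le ..
    rw [hfil2, hzip1, bump_bump res hr]
    have : (As.zip Bs).length - ((As.zip Bs).filter (keepN n)).length +
        (((As.zip Bs).filter (keepN n)).length - ((As.zip Bs).filter (survA (n :: rest))).length) =
        (As.zip Bs).length - ((As.zip Bs).filter (survA (n :: rest))).length := by omega
    rw [this]

lemma skipNails_split (a : Int) : ∀ (l : List Int),
    ∃ pre, l = pre ++ skipNails a l ∧ ∀ x ∈ pre, x < a := by
  intro l
  induction l with
  | nil => exact ⟨[], by simp [skipNails]⟩
  | cons n rest ih =>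
    by_cases h : n < a
    · obtain ⟨pre, hpre, hlt⟩ := ih
      refine ⟨n :: pre, ?_, ?_⟩
      · simp only [skipNails, if_pos h, List.cons_append]
        rw [← hpre]
      · intro x hx
        rcases List.mem_cons.1 hx with rfl | hx
        · exact h
        · exact hlt x hx
    · exact ⟨[], by simp [skipNails, h]⟩

lemma skipNails_head_ge (a : Int) : ∀ (l : List Int) (m : List Int) (x : Int),
    skipNails a l = x :: m → a ≤ x := by
  intro l
  induction l with
  | nil => intro m x h; simp [skipNails] at h
  | cons n rest ih =>
    intro m x h
    by_cases hn : n < a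
    · simp only [skipNails, if_pos hn] at h
      exact ih m x h
    · simp only [skipNails, if_neg hn] at h
      injection h with h1 _
      omega

-- membership in the skipped list: exactly the nails ≥ a (nails sorted)

lemma skipNails_mem (a : Int) (l : List Int) (hl : l.Pairwise (· ≤ ·)) (m : Int) :
    m ∈ skipNails a l ↔ (m ∈ l ∧ a ≤ m) := by
  obtain ⟨pre, hsplit, hlt⟩ := skipNails_split a l
  constructor
  · intro hm
    refine ⟨by rw [hsplit]; exact List.mem_append_right _ hm, ?_⟩
    cases hsk : skipNails a l with
    | nil => rw [hsk] at hm; simp at hm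
    | cons x t =>
      have hax : a ≤ x := skipNails_head_ge a l t x hsk
      have hpair : (skipNails a l).Pairwise (· ≤ ·) := by
        rw [hsplit] at hl
        exact (List.pairwise_append.mp hl).2.1
      rw [hsk] at hm hpair
      rcases List.mem_cons.1 hm with rfl | hm
      · exact hax
      · have := (List.pairwise_cons.mp hpair).1 m hm
        omega
  · rintro ⟨hm, ham⟩
    rw [hsplit] at hm
    rcases List.mem_append.1 hm with hm | hm
    · exact absurd (hlt m hm) (by omega)
    · exact hm

lemma skipNails_pairwise (a : Int) (l : List Int) (hl : l.Pairwise (· ≤ ·)) :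
    (skipNails a l).Pairwise (· ≤ ·) := by
  obtain ⟨pre, hsplit, _⟩ := skipNails_split a l
  rw [hsplit] at hl
  exact (List.pairwise_append.mp hl).2.1

lemma altLoop_iff : ∀ (P : List (Int × Int)) (nl : List Int),
    nl.Pairwise (· ≤ ·) → P.Pairwise (fun p q => p.1 ≤ q.1) →
    (altLoop P nl = true ↔ ∀ p ∈ P, ∃ m ∈ nl, p.1 ≤ m ∧ m ≤ p.2) := by
  intro P
  induction P with
  | nil => intro nl _ _; simp [altLoop]
  | cons p rest ih =>
    intro nl hnl hP
    obtain ⟨a, b⟩ := p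
    have hrest : rest.Pairwise (fun p q => p.1 ≤ q.1) := (List.pairwise_cons.mp hP).2
    have hble : ∀ q ∈ rest, a ≤ q.1 := (List.pairwise_cons.mp hP).1
    cases hsk : skipNails a nl with
    | nil =>
      simp only [altLoop, hsk]
      constructor
      · intro h; exact absurd h (by simp)
      · intro h
        obtain ⟨m, hm, ham, hmb⟩ := h (a, b) (List.mem_cons_self ..)
        have : m ∈ skipNails a nl := (skipNails_mem a nl hnl m).mpr ⟨hm, ham⟩
        rw [hsk] at this
        simp at this
    | cons x t =>
      have hax : a ≤ x := skipNails_head_ge a nl t x hsk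
      have hxnl : x ∈ nl := by
        have : x ∈ skipNails a nl := by rw [hsk]; simp
        exact ((skipNails_mem a nl hnl x).mp this).1
      have hskp : (x :: t).Pairwise (· ≤ ·) := hsk ▸ skipNails_pairwise a nl hnl
      by_cases hbx : b < x
      · simp only [altLoop, hsk, if_pos hbx]
        constructor
        · intro h; exact absurd h (by simp)
        · intro h
          obtain ⟨m, hm, ham, hmb⟩ := h (a, b) (List.mem_cons_self ..)
          have hmsk : m ∈ skipNails a nl := (skipNails_mem a nl hnl m).mpr ⟨hm, ham⟩
          rw [hsk] at hmsk
          rcases List.mem_cons.1 hmsk with rfl | hmsk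
          · omega
          · have := (List.pairwise_cons.mp hskp).1 m hmsk
            omega
      · simp only [altLoop, hsk, if_neg hbx]
        rw [ih (x :: t) hskp hrest]
        constructor
        · intro h q hq
          rcases List.mem_cons.1 hq with rfl | hq
          · exact ⟨x, hxnl, hax, by omega⟩
          · obtain ⟨m, hm, h1, h2⟩ := h q hq
            have : m ∈ skipNails a nl := by rw [hsk]; exact hm
            exact ⟨m, ((skipNails_mem a nl hnl m).mp this).1, h1, h2⟩
        · intro h q hq
          obtain ⟨m, hm, h1, h2⟩ := h q (List.mem_cons_of_mem _ hq)
          have haq : a ≤ q.1 := hble q hq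
          have : m ∈ skipNails a nl := (skipNails_mem a nl hnl m).mpr ⟨hm, by omega⟩
          rw [hsk] at this
          exact ⟨m, this, h1, h2⟩

theorem solution_spec_aux : ∀ (A B C : List Int), A.length ≤ B.length →
    solution A B C = solution_alt A B C := by
  intro A B C hpre
  have hlenA : (PySem.List.sorted A (fun x => x) false).length = A.length :=
    PySem.List.length_sorted ..
  have hlenB : (PySem.List.sorted B (fun x => x) false).length = B.length :=
    PySem.List.length_sorted ..
  have hlen : (PySem.List.sorted A (fun x => x) false).length ≤
      (PySem.List.sorted B (fun x => x) false).length := by omega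
  obtain ⟨As', Bs', heq, hzip, hmap, _⟩ :=
    outer_spec (PySem.Set.ofList C) (PySem.List.sorted A (fun x => x) false)
      (PySem.List.sorted B (fun x => x) false) (-1) hlen (Or.inl rfl)
  have hPlen : ((PySem.List.sorted A (fun x => x) false).zip
      (PySem.List.sorted B (fun x => x) false)).length = A.length := by
    simp only [List.length_zip]
    omega
  have hnlPW : (PySem.List.sorted (PySem.Set.ofList C) (fun x => x) false).Pairwise (· ≤ ·) :=
    PySem.List.sorted_pairwise ..
  have hPPW : ((PySem.List.sorted A (fun x => x) false).zip
      (PySem.List.sorted B (fun x => x) false)).Pairwise (fun p q => p.1 ≤ q.1) := by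
    rw [List.pairwise_iff_getElem]
    intro i j hi hj hij
    have hj' : j < (PySem.List.sorted A (fun x => x) false).length := by
      simp only [List.length_zip] at hj
      omega
    rw [List.getElem_zip, List.getElem_zip]
    exact PySem.List.sorted_id_getElem_mono A (le_of_lt hij) hj'
  have hsurv : ∀ p : Int × Int, (¬ survA (PySem.Set.ofList C) p = true) ↔
      ∃ m ∈ PySem.List.sorted (PySem.Set.ofList C) (fun x => x) false, p.1 ≤ m ∧ m ≤ p.2 := by
    intro p
    simp [survA, covN, PySem.List.mem_sorted]
  have hRnil : (((PySem.List.sorted A (fun x => x) false).zip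
        (PySem.List.sorted B (fun x => x) false)).filter (survA (PySem.Set.ofList C)) = []) ↔
      (altLoop ((PySem.List.sorted A (fun x => x) false).zip
        (PySem.List.sorted B (fun x => x) false))
        (PySem.List.sorted (PySem.Set.ofList C) (fun x => x) false) = true) := by
    rw [List.filter_eq_nil_iff, altLoop_iff _ _ hnlPW hPPW]
    constructor
    · intro h p hp
      exact (hsurv p).1 (h p hp)
    · intro h p hp
      exact (hsurv p).2 (h p hp)
  have hval : solution A B C =
      (if As' = [] then
        bump (-1) (((PySem.List.sorted A (fun x => x) false).zip
            (PySem.List.sorted B (fun x => x) false)).length -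
          (((PySem.List.sorted A (fun x => x) false).zip
            (PySem.List.sorted B (fun x => x) false)).filter (survA (PySem.Set.ofList C))).length)
       else -1) := by
    simp only [solution]
    rw [heq]
  by_cases hA : A = []
  · have hsA0 : PySem.List.sorted A (fun x => x) false = [] :=
      (PySem.List.sorted_eq_nil_iff ..).mpr hA
    have hAs' : As' = [] := by
      rw [hmap, hsA0]
      simp
    rw [hval, if_pos hAs', hsA0]
    simp [solution_alt, hA, bump]
  · by_cases hcov : altLoop ((PySem.List.sorted A (fun x => x) false).zip
        (PySem.List.sorted B (fun x => x) false))
        (PySem.List.sorted (PySem.Set.ofList C) (fun x => x) false) = true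
    · have hR : ((PySem.List.sorted A (fun x => x) false).zip
          (PySem.List.sorted B (fun x => x) false)).filter (survA (PySem.Set.ofList C)) = [] :=
        hRnil.mpr hcov
      have hAs' : As' = [] := by rw [hmap, hR]; simp
      have hAlen : A.length ≠ 0 := by
        intro h
        exact hA (List.eq_nil_of_length_eq_zero h)
      rw [hval, if_pos hAs', hR, hPlen]
      simp only [solution_alt, if_neg hA, hcov, if_pos]
      simp only [List.length_nil, Nat.sub_zero]
      unfold bump
      rw [if_neg hAlen]
      simp
    · have hR : ((PySem.List.sorted A (fun x => x) false).zip
          (PySem.List.sorted B (fun x => x) false)).filter (survA (PySem.Set.ofList C)) ≠ [] := by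
        intro h
        exact hcov (hRnil.mp h)
      have hAs' : As' ≠ [] := by
        rw [hmap]
        intro h
        exact hR (List.map_eq_nil_iff.mp h)
      rw [hval, if_neg hAs']
      simp [solution_alt, hA, hcov]

-- ===== VERDICT (by name: the statement is the Claim_ definition above) =====
theorem solution_spec : Claim_equal_solution := by
  intro A B C _ hpre
  unfold Spec_solution
  exact solution_spec_aux A B C hpre
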